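-- pv_equiv track=rewrite | github.com/papanokechi/wallis-pcf-lean4 | ratio_univ_extension.py | compute_strict
-- ===== SOURCE A (Python) =====
-- def compute_strict(N):
--     """q(n) = number of partitions into distinct parts.
--     Generating function: prod_{m>=1} (1+q^m).
--     Recurrence: q(n) = q(n-1) + q(n-2) - q(n-5) - q(n-7) + q(n-12) + ...
--     using generalized pentagonal numbers with alternating signs.
--     More stable: use the relation to p(n) via Euler's identity:
--     q(n) = sum_{k>=0} (-1)^k * p(n - k(3k-1)/2) + similar terms.
--     Actually easiest: direct product expansion."""
--     # Direct convolution: prod (1+q^m) = sum q(n) q^n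
--     q = [0] * (N + 1)
--     q[0] = 1
--     for m in range(1, N + 1):
--         # Multiply by (1 + q^m): process in reverse to avoid double-counting
--         for n in range(N, m - 1, -1):
--             q[n] += q[n - m]
--     # Verify against known values (OEIS A000009)
--     known = [1, 1, 1, 2, 2, 3, 4, 5, 6, 8, 10, 12, 15, 18, 22, 27, 32, 38, 46, 54, 64]
--     for i, v in enumerate(known):
--         if i <= N:
--             assert q[i] == v, f"q({i})={q[i]} != {v}"
--     return q
-- ===== SOURCE B (Python) =====
-- def compute_strict(N):
--     """q(n) for n=0..N via the exactly-k-distinct-parts recurrence: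
--     subtracting 1 from each of k distinct parts of n gives either k or k-1
--     distinct parts of n-k, so T(n,k) = T(n-k,k) + T(n-k,k-1).
--     Only k with k*(k+1)//2 <= N contribute: O(N*sqrt(N)) instead of O(N^2)."""
--     total = [1] + [0] * N          # k = 0 row: the empty partition of 0
--     row = [1] + [0] * N            # row[n] = T(n, k-1)
--     k = 1
--     while k * (k + 1) // 2 <= N:
--         new = [0] * (N + 1)
--         for n in range(k, N + 1):
--             new[n] = new[n - k] + row[n - k]
--             total[n] += new[n]
--         row = new
--         k += 1
--     return total
-- ===== Notes on version B (the rewrite author's own statement) =====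
-- stated objective: faster
-- what changed: Replaces A's O(N^2) in-place 0/1-knapsack product over all parts m=1..N by the exactly-k-distinct-parts staircase recurrence T(n,k)=T(n-k,k)+T(n-k,k-1), where only the O(sqrt(N)) values of k with k(k+1)/2 <= N contribute, giving an O(N*sqrt(N)) row-by-row accumulation.
-- outside the precondition, e.g. on compute_strict(-1): A raises IndexError, B returns [1]
import Mathlib
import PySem

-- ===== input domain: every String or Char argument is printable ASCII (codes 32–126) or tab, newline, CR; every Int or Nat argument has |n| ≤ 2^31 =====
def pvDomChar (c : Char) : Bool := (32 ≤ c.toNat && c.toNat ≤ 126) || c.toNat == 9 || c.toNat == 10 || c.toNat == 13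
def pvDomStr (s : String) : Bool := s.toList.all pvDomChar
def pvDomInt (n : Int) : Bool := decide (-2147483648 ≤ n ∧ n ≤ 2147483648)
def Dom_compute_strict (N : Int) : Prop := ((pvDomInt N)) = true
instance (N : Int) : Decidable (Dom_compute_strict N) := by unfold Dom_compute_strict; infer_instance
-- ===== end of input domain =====

-- B replaces A's O(N^2) subset-sum product by the exactly-k-distinct-parts recurrence
-- T(n,k) = T(n-k,k) + T(n-k,k-1) with k(k+1)/2 <= N, an O(N*sqrt(N)) algorithm.

-- ===== PORT A =====
def knownA : List Int := [1,1,1,2,2,3,4,5,6,8,10,12,15,18,22,27,32,38,46,54,64]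

def compute_strict (N : Int) : List Int :=
  -- q = [0]*(N+1); q[0] = 1  (index 0 is in range exactly when N >= 0; Pre_ excludes N < 0)
  let q : List Int := PySem.List.pySetD (List.replicate (N+1).toNat 0) 0 1
  -- for m in range(1, N+1): for n in range(N, m-1, -1): q[n] += q[n-m]
  let q := (PySem.List.pyRange 1 (N+1) 1).foldl (fun q m =>
      (PySem.List.pyRange N (m-1) (-1)).foldl (fun q n =>
        PySem.List.pySetD q n (PySem.List.pyGetD q n 0 + PySem.List.pyGetD q (n-m) 0)) q) q
  -- for i, v in enumerate(known): if i <= N: assert q[i] == v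
  -- (the assert never fires for N >= 0 — proved below; a raise is not representable, so the
  --  failing branch returns [] and the proof shows the check passes on all of Pre_)
  if (PySem.List.enumerate knownA).all (fun iv => !(decide (iv.1 ≤ N)) || (PySem.List.pyGetD q iv.1 0 == iv.2)) then q else []

-- ===== PORT B =====
-- while k*(k+1)//2 <= N: build row k of T from row k-1, accumulating into total
def altLoop (N : Int) (k : Int) (row total : List Int) : List Int :=
  if h : PySem.Int.floordiv (k * (k + 1)) 2 ≤ N then
    -- new = [0]*(N+1); for n in range(k, N+1): new[n] = new[n-k] + row[n-k]; total[n] += new[n]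
    let p := (PySem.List.pyRange k (N+1) 1).foldl (fun (p : List Int × List Int) n =>
        let nw := PySem.List.pySetD p.1 n
          (PySem.List.pyGetD p.1 (n - k) 0 + PySem.List.pyGetD row (n - k) 0)
        (nw, PySem.List.pySetD p.2 n (PySem.List.pyGetD p.2 n 0 + PySem.List.pyGetD nw n 0)))
      (List.replicate (N+1).toNat 0, total)
    altLoop N (k+1) p.1 p.2
  else total
termination_by (N + 1 - k).toNat
decreasing_by
  have h2 : PySem.Int.floordiv (k * (k + 1)) 2 = (k * (k+1)) / 2 :=
    PySem.Int.floordiv_eq_ediv_of_pos (by norm_num)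
  have hk : k ≤ N := by
    rcases le_or_gt k 0 with hk0 | hk0
    · have h0 : 0 ≤ k * (k + 1) := by
        rcases le_or_gt k (-1) with h1 | h1
        · nlinarith [mul_nonneg (by omega : (0:ℤ) ≤ -k) (by omega : (0:ℤ) ≤ -(k+1))]
        · nlinarith
      have : 0 ≤ k * (k+1) / 2 := Int.ediv_nonneg h0 (by norm_num)
      omega
    · have h1 : k * 2 ≤ k * (k + 1) := by nlinarith
      have := Int.ediv_le_ediv (by norm_num : (0:Int) < 2) h1
      simp at this; omega
  omega

def compute_strict_alt (N : Int) : List Int :=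
  let total : List Int := 1 :: List.replicate N.toNat 0
  let row : List Int := 1 :: List.replicate N.toNat 0
  altLoop N 1 row total

-- ===== PRECONDITION & SPEC =====
-- Pre_ excludes exactly N < 0, where Python A raises IndexError (q[0] = 1 on the empty list).
def Pre_compute_strict (N : Int) : Prop := 0 ≤ N
instance (N : Int) : Decidable (Pre_compute_strict N) := by unfold Pre_compute_strict; infer_instance

def pvWitness_compute_strict : Int := (5)

def Spec_compute_strict (N : Int) (out : List Int) : Prop := out = compute_strict_alt N
instance (N : Int) (out : List Int) : Decidable (Spec_compute_strict N out) := by unfold Spec_compute_strict; infer_instance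

-- ===== CLAIM (what is proved, stated in full; the proofs are below) =====
def Claim_equal_compute_strict : Prop := ∀ (N : Int), Dom_compute_strict N → Pre_compute_strict N → Spec_compute_strict N (compute_strict N)

-- ===== LEMMAS AND PROOFS =====

-- q(n) restricted: Drec m n = number of partitions of n into distinct parts ≤ m (A's recurrence)
def Drec : Nat → Nat → Int
  | 0, n => if n = 0 then 1 else 0
  | m+1, n => Drec m n + (if m+1 ≤ n then Drec m (n-(m+1)) else 0)

-- B's recurrence: Trec n k = number of partitions of n into exactly k distinct parts
def Trec (n k : Nat) : Int :=
  match k with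
  | 0 => if n = 0 then 1 else 0
  | k'+1 => if n < k'+1 then 0 else Trec (n-(k'+1)) (k'+1) + Trec (n-(k'+1)) k'
termination_by n
decreasing_by all_goals omega

-- refinement of Drec by part count: Wrec m n k = partitions of n into exactly k distinct parts ≤ m
def Wrec : Nat → Nat → Nat → Int
  | 0, n, k => if n = 0 ∧ k = 0 then 1 else 0
  | m+1, n, k => Wrec m n k + (if m+1 ≤ n ∧ 1 ≤ k then Wrec m (n-(m+1)) (k-1) else 0)

def tri (k : Nat) : Nat := k*(k+1)/2

def AnsB (n : Nat) : Int := ∑ k ∈ Finset.range (n+1), Trec n k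

lemma tri_ge (k : Nat) : k ≤ tri k := by
  cases k with
  | zero => simp [tri]
  | succ k' =>
    unfold tri
    rw [Nat.le_div_iff_mul_le (by norm_num)]
    exact Nat.mul_le_mul_left _ (by omega)

lemma tri_succ (k : Nat) : tri (k+1) = tri k + (k+1) := by
  unfold tri
  have h : (k+1)*(k+1+1) = k*(k+1) + (k+1)*2 := by ring
  rw [h, Nat.add_mul_div_right _ _ (by norm_num : (0:Nat) < 2)]

lemma tri_mono : ∀ {i j : Nat}, i ≤ j → tri i ≤ tri j := by
  intro i j h
  induction j with
  | zero => have : i = 0 := by omega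
            simp [this]
  | succ j ih =>
    rcases Nat.lt_or_ge i (j+1) with h1 | h1
    · have := ih (by omega); rw [tri_succ]; omega
    · have h2 : i = j+1 := by omega
      rw [h2]

lemma Wvanish : ∀ m n k : Nat, (m < k ∨ n < tri k) → Wrec m n k = 0 := by
  intro m
  induction m with
  | zero =>
    intro n k h
    simp only [Wrec]
    rcases h with h | h
    · have : k ≠ 0 := by omega
      simp [this]
    · split
      · next h2 => exfalso; rcases h2 with ⟨rfl, rfl⟩; simp [tri] at h
      · rfl
  | succ m ih =>
    intro n k h
    simp only [Wrec]
    rcases h with h | h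
    · rw [ih n k (Or.inl (by omega))]
      split
      · next h2 => rw [ih _ (k-1) (Or.inl (by omega))]; ring
      · ring
    · rw [ih n k (Or.inr h)]
      split
      · next h2 =>
        rw [ih (n-(m+1)) (k-1) ?_]
        · ring
        · rcases Nat.lt_or_ge m k with h3 | h3
          · -- k ≥ m+1 ... not necessarily enough; use tri argument when m+1 ≥ k, else m < k-1 or k-1 = m
            rcases Nat.lt_or_ge (m+1) k with h4 | h4
            · exact Or.inl (by omega)
            · -- k ≤ m+1: n - (m+1) < tri k - k = tri (k-1)
              right
              have h5 := tri_succ (k-1)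
              have h6 : k-1+1 = k := by omega
              rw [h6] at h5
              omega
          · -- m ≥ k, so m+1 ≥ k too: same tri argument
            right
            have h5 := tri_succ (k-1)
            have h6 : k-1+1 = k := by omega
            rw [h6] at h5
            omega
      · ring

lemma Wstab : ∀ m n k : Nat, n ≤ m → Wrec m n k = Wrec n n k := by
  intro m
  induction m with
  | zero => intro n k h; have : n = 0 := by omega
            rw [this]
  | succ m ih =>
    intro n k h
    rcases Nat.lt_or_ge n (m+1) with h1 | h1
    · simp only [Wrec]
      have h2 : ¬ (m+1 ≤ n ∧ 1 ≤ k) := by omega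
      simp only [if_neg h2, add_zero]
      exact ih n k (by omega)
    · have : n = m+1 := by omega
      rw [this]

lemma W0col : ∀ m n : Nat, Wrec m n 0 = if n = 0 then 1 else 0 := by
  intro m
  induction m with
  | zero => intro n; simp [Wrec]
  | succ m ih =>
    intro n
    simp only [Wrec]
    have h2 : ¬ (m+1 ≤ n ∧ 1 ≤ 0) := by omega
    simp only [if_neg h2, add_zero]
    exact ih n

lemma Wstair : ∀ m n k : Nat, 1 ≤ k → k ≤ n →
    Wrec (m+1) n k = Wrec m (n-k) k + Wrec m (n-k) (k-1) := by
  intro m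
  induction m with
  | zero =>
    intro n k hk hkn
    simp only [Wrec]
    have h1 : ¬ (n = 0 ∧ k = 0) := by omega
    rcases Nat.lt_or_ge n 2 with h2 | h2
    · -- n = 1, k = 1 (n ≥ k ≥ 1)
      have hn : n = 1 := by omega
      have hk1 : k = 1 := by omega
      subst hn; subst hk1; norm_num
    · -- n ≥ 2: LHS second term [n-1=0...] = 0
      have h3 : ¬ (n - 1 = 0 ∧ k - 1 = 0) := by omega
      have h4 : ¬ (n - k = 0 ∧ k = 0) := by omega
      simp only [if_neg h1, if_pos (by omega : 1 ≤ n ∧ 1 ≤ k), if_neg h3, if_neg h4]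
      have h5 : (if n - k = 0 ∧ k - 1 = 0 then (1:Int) else 0) = 0 := by
        rw [if_neg]; omega
      rw [h5]
      try ring
  | succ m ih =>
    intro n k hk hkn
    -- LHS = Wrec (m+1) n k + [m+2 ≤ n] Wrec (m+1) (n-(m+2)) (k-1)
    show Wrec (m+1) n k + (if m+2 ≤ n ∧ 1 ≤ k then Wrec (m+1) (n-(m+2)) (k-1) else 0) = _
    rw [ih n k hk hkn]
    show _ = Wrec m (n-k) k + (if m+1 ≤ n-k ∧ 1 ≤ k then Wrec m (n-k-(m+1)) (k-1) else 0)
           + (Wrec m (n-k) (k-1) + (if m+1 ≤ n-k ∧ 1 ≤ k-1 then Wrec m (n-k-(m+1)) (k-1-1) else 0))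
    rcases Nat.lt_or_ge (n-k) (m+1) with hc | hc
    · -- n < m+1+k : RHS extra terms vanish; LHS extra must vanish too
      have e1 : ¬ (m+1 ≤ n-k ∧ 1 ≤ k) := by omega
      have e2 : ¬ (m+1 ≤ n-k ∧ 1 ≤ k-1) := by omega
      simp only [if_neg e1, if_neg e2, add_zero]
      rcases Nat.lt_or_ge n (m+2) with hd | hd
      · rw [if_neg (by omega)]; ring
      · -- m+2 ≤ n ≤ m+k: the LHS extra term is 0 by Wvanish
        rw [if_pos (by omega)]
        have hk2 : 2 ≤ k := by omega
        have : Wrec (m+1) (n-(m+2)) (k-1) = 0 := by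
          apply Wvanish
          right
          have := tri_ge (k-1)
          omega
        rw [this]; ring
    · -- m+1 ≤ n-k : all guards on
      have e1 : (m+1 ≤ n-k ∧ 1 ≤ k) := by omega
      have hd : m+2 ≤ n := by omega
      rw [if_pos e1, if_pos (by omega : m+2 ≤ n ∧ 1 ≤ k)]
      rcases Nat.lt_or_ge k 2 with hk1 | hk1
      · -- k = 1
        have hk1' : k = 1 := by omega
        subst hk1'
        have e2 : ¬ (m+1 ≤ n-1 ∧ 1 ≤ (1:Nat)-1) := by omega
        rw [if_neg e2]
        have h7 : Wrec (m+1) (n-(m+2)) (1-1) = Wrec m (n-1-(m+1)) (1-1) := by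
          rw [show (1:Nat)-1 = 0 from rfl, W0col, W0col,
              show n - (m+2) = n - 1 - (m+1) from by omega]
        rw [h7]; ring
      · -- k ≥ 2: apply IH to the LHS extra term
        have e2 : (m+1 ≤ n-k ∧ 1 ≤ k-1) := by omega
        rw [if_pos e2]
        rw [ih (n-(m+2)) (k-1) (by omega) (by omega)]
        have r1 : n-(m+2)-(k-1) = n-k-(m+1) := by omega
        rw [r1]; ring

lemma TW : ∀ n k : Nat, Trec n k = Wrec n n k := by
  intro n
  induction n using Nat.strong_induction_on with
  | _ n ih =>
    intro k
    match k with
    | 0 => rw [Trec, W0col]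
    | k'+1 =>
      rw [Trec]
      rcases Nat.lt_or_ge n (k'+1) with h | h
      · rw [if_pos h, Wvanish n n (k'+1) (Or.inr (by have := tri_ge (k'+1); omega))]
      · rw [if_neg (by omega)]
        have hst := Wstair (n-1) n (k'+1) (by omega) (by omega)
        rw [show (n-1)+1 = n from by omega] at hst
        rw [hst, show (k'+1)-1 = k' from rfl,
            Wstab (n-1) (n-(k'+1)) (k'+1) (by omega),
            Wstab (n-1) (n-(k'+1)) k' (by omega),
            ← ih (n-(k'+1)) (by omega) (k'+1), ← ih (n-(k'+1)) (by omega) k']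

lemma DW : ∀ m n : Nat, Drec m n = ∑ k ∈ Finset.range (n+1), Wrec m n k := by
  intro m
  induction m with
  | zero =>
    intro n
    show (if n = 0 then (1:Int) else 0) = _
    rcases eq_or_ne n 0 with h | h
    · subst h; simp [Wrec]
    · rw [if_neg h]
      rw [Finset.sum_congr rfl (fun k _ => show Wrec 0 n k = 0 by
        simp only [Wrec]; rw [if_neg (by omega)])]
      simp
  | succ m ih =>
    intro n
    show Drec m n + (if m+1 ≤ n then Drec m (n-(m+1)) else 0)
        = ∑ k ∈ Finset.range (n+1), (Wrec m n k + (if m+1 ≤ n ∧ 1 ≤ k then Wrec m (n-(m+1)) (k-1) else 0))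
    rw [Finset.sum_add_distrib, ← ih n]
    congr 1
    rcases Nat.lt_or_ge n (m+1) with h | h
    · rw [if_neg (by omega)]
      rw [Finset.sum_congr rfl (fun k _ => show (if m+1 ≤ n ∧ 1 ≤ k then Wrec m (n-(m+1)) (k-1) else 0) = 0 by
        rw [if_neg (by omega)])]
      simp
    · rw [if_pos h]
      rw [Finset.sum_congr rfl (fun k _ => show (if m+1 ≤ n ∧ 1 ≤ k then Wrec m (n-(m+1)) (k-1) else 0)
            = (if 1 ≤ k then Wrec m (n-(m+1)) (k-1) else 0) by
        rcases Nat.lt_or_ge k 1 with hk | hk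
        · rw [if_neg (by omega), if_neg (by omega)]
        · rw [if_pos (by omega), if_pos hk])]
      rw [Finset.sum_range_succ']
      simp only [Nat.add_sub_cancel]
      rw [if_neg (by omega : ¬ 1 ≤ 0), add_zero]
      have hsimp : ∀ i ∈ Finset.range n, (if 1 ≤ i+1 then Wrec m (n-(m+1)) i else 0) = Wrec m (n-(m+1)) i := by
        intro i _
        rw [if_pos (by omega)]
      rw [Finset.sum_congr rfl hsimp, ih (n-(m+1))]
      -- range (n-(m+1)+1) vs range n : extra terms vanish
      apply Finset.sum_subset
      · intro x hx
        simp only [Finset.mem_range] at *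
        omega
      · intro x hx hnx
        simp only [Finset.mem_range] at *
        apply Wvanish
        right
        have := tri_ge x
        omega

lemma Dstab : ∀ m n : Nat, n ≤ m → Drec m n = Drec n n := by
  intro m
  induction m with
  | zero => intro n k; have : n = 0 := by omega
            rw [this]
  | succ m ih =>
    intro n h
    rcases Nat.lt_or_ge n (m+1) with h1 | h1
    · show Drec m n + _ = _
      rw [if_neg (by omega), add_zero]
      exact ih n (by omega)
    · have : n = m+1 := by omega
      rw [this]

lemma Ttri : ∀ n k : Nat, tri k > n → Trec n k = 0 := by
  intro n k h; rw [TW]; exact Wvanish _ _ _ (Or.inr h)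

lemma main_identity (n : Nat) : Drec n n = AnsB n := by
  rw [DW, AnsB]
  exact Finset.sum_congr rfl (fun k _ => (TW n k).symm)

lemma Tlt (j k : Nat) (h : j < k) : Trec j k = 0 := by
  rw [TW]
  exact Wvanish _ _ _ (Or.inr (by have := tri_ge k; omega))

lemma sumT (j K : Nat) (h : ∀ i, K ≤ i → Trec j i = 0) :
    ∑ i ∈ Finset.range K, Trec j i = AnsB j := by
  rcases Nat.lt_or_ge (j+1) K with hK | hK
  · symm
    refine Finset.sum_subset ?_ ?_
    · intro x hx; simp only [Finset.mem_range] at *; omega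
    · intro x _ hnx
      simp only [Finset.mem_range] at hnx
      exact Ttri j x (by have := tri_ge x; omega)
  · refine Finset.sum_subset ?_ ?_
    · intro x hx; simp only [Finset.mem_range] at *; omega
    · intro x _ hnx
      simp only [Finset.mem_range] at hnx
      exact h x (by omega)

lemma rangeNeg (a b : ℤ) : PySem.List.pyRange a b (-1)
    = (List.range (a-b).toNat).map (fun k : ℕ => a - (k:ℤ)) := by
  simp only [PySem.List.pyRange]
  norm_num
  rcases lt_or_ge b a with h | h
  · rw [if_pos h]
    exact List.map_congr_left (fun k _ => by ring)
  · rw [if_neg (by omega), show (a-b).toNat = 0 from by omega]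
    simp

lemma getD_setD_int (xs : List ℤ) (i v j : ℤ) (h0 : 0 ≤ i) (h1 : i < (xs.length:ℤ)) (h2 : 0 ≤ j) :
    PySem.List.pyGetD (PySem.List.pySetD xs i v) j 0 = if j = i then v else PySem.List.pyGetD xs j 0 := by
  have hi : i = ((i.toNat : ℕ) : ℤ) := by omega
  have hj : j = ((j.toNat : ℕ) : ℤ) := by omega
  rw [hi, hj, PySem.List.pyGetD_pySetD_natCast _ _ _ _ _ (by omega)]
  by_cases h : j.toNat = i.toNat
  · rw [if_pos h, if_pos (by omega)]
  · rw [if_neg h, if_neg (by omega)]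

-- A's inner loop (for n in range(N, m-1, -1): q[n] += q[n-m]) over a descending block
lemma Ainner : ∀ (c : Nat) (m a : ℤ) (q : List ℤ), 1 ≤ m → m - 1 + c ≤ a → a < (q.length:ℤ) →
    (((List.range c).map (fun k : ℕ => a - (k:ℤ))).foldl
      (fun q n => PySem.List.pySetD q n (PySem.List.pyGetD q n 0 + PySem.List.pyGetD q (n-m) 0)) q).length = q.length ∧
    ∀ j : ℤ, 0 ≤ j →
      PySem.List.pyGetD (((List.range c).map (fun k : ℕ => a - (k:ℤ))).foldl
        (fun q n => PySem.List.pySetD q n (PySem.List.pyGetD q n 0 + PySem.List.pyGetD q (n-m) 0)) q) j 0 =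
      if a - c < j ∧ j ≤ a then PySem.List.pyGetD q j 0 + PySem.List.pyGetD q (j - m) 0
      else PySem.List.pyGetD q j 0 := by
  intro c
  induction c with
  | zero =>
    intro m a q hm hc ha
    constructor
    · rfl
    · intro j hj
      simp only [List.range_zero, List.map_nil, List.foldl_nil]
      rw [if_neg (by omega)]
  | succ c ih =>
    intro m a q hm hc ha
    obtain ⟨ihlen, ihget⟩ := ih m a q hm (by omega) ha
    rw [List.range_succ, List.map_append, List.foldl_append]
    have hac0 : 0 ≤ a - c := by omega
    have hacl : a - (c:ℤ) <
        ((List.foldl (fun q n => PySem.List.pySetD q n (PySem.List.pyGetD q n 0 + PySem.List.pyGetD q (n - m) 0))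
          q (List.map (fun k : ℕ => a - (k:ℤ)) (List.range c))).length : ℤ) := by
      rw [ihlen]; omega
    constructor
    · simp only [List.map_cons, List.map_nil, List.foldl_cons, List.foldl_nil,
        PySem.List.length_pySetD, ihlen]
    · intro j hj
      simp only [List.map_cons, List.map_nil, List.foldl_cons, List.foldl_nil]
      rw [getD_setD_int _ _ _ _ hac0 hacl hj]
      by_cases hji : j = a - c
      · rw [if_pos hji, if_pos (by omega)]
        rw [ihget (a-c) hac0, ihget (a-c-m) (by omega)]
        rw [if_neg (by omega), if_neg (by omega)]
        rw [hji]
      · rw [if_neg hji, ihget j hj]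
        by_cases hcond : a - c < j ∧ j ≤ a
        · rw [if_pos hcond, if_pos (by omega)]
        · rw [if_neg hcond, if_neg (by omega)]

def Astep (N : ℤ) (q : List ℤ) (m : ℤ) : List ℤ :=
  (PySem.List.pyRange N (m-1) (-1)).foldl (fun q n =>
    PySem.List.pySetD q n (PySem.List.pyGetD q n 0 + PySem.List.pyGetD q (n-m) 0)) q

def Ainit (N : ℤ) : List ℤ := PySem.List.pySetD (List.replicate (N+1).toNat 0) 0 1

def Aloop (N : ℤ) (M : ℤ) : List ℤ := (PySem.List.pyRange 1 M 1).foldl (Astep N) (Ainit N)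

lemma Ainit_len (N : ℤ) : (Ainit N).length = (N+1).toNat := by
  rw [Ainit, PySem.List.length_pySetD, List.length_replicate]

lemma Ainit_get (N : ℤ) (hN : 0 ≤ N) : ∀ j : ℤ, 0 ≤ j → j ≤ N →
    PySem.List.pyGetD (Ainit N) j 0 = Drec 0 j.toNat := by
  intro j h0 h1
  rw [Ainit, getD_setD_int _ _ _ _ (by omega) (by rw [List.length_replicate]; omega) h0]
  by_cases hj : j = 0
  · rw [if_pos hj, show Drec 0 j.toNat = 1 from by
      show (if j.toNat = 0 then (1:Int) else 0) = 1
      rw [if_pos (by omega)]]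
  · rw [if_neg hj, PySem.List.pyGetD_of_nonneg _ _ h0,
      show Drec 0 j.toNat = 0 from by
        show (if j.toNat = 0 then (1:Int) else 0) = 0
        rw [if_neg (by omega)]]
    exact List.getD_replicate 0 (by omega)

-- A's outer loop: after processing m = 1..M-1, the array holds Drec (M-1)
lemma Aouter (N : ℤ) (hN : 0 ≤ N) : ∀ (M : ℤ), 0 ≤ M → M ≤ N+1 →
    (Aloop N M).length = (N+1).toNat ∧
    ∀ j : ℤ, 0 ≤ j → j ≤ N →
      PySem.List.pyGetD (Aloop N M) j 0 = Drec (M-1).toNat j.toNat := by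
  intro M h0 h1
  induction hd : M.toNat generalizing M with
  | zero =>
    have hM0 : M = 0 := by omega
    subst hM0
    rw [Aloop, show PySem.List.pyRange 1 0 1 = [] from by rw [PySem.List.pyRange_one]; simp]
    exact ⟨Ainit_len N, Ainit_get N hN⟩
  | succ d ih =>
    rcases eq_or_ne M 1 with hM1 | hM1
    · subst hM1
      rw [Aloop, show PySem.List.pyRange 1 1 1 = [] from by rw [PySem.List.pyRange_one]; simp]
      exact ⟨Ainit_len N, Ainit_get N hN⟩
    · have hM2 : 2 ≤ M := by omega
      have hsplit : Aloop N M = Astep N (Aloop N (M-1)) (M-1) := by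
        rw [Aloop, Aloop, show M = (M-1)+1 from by ring,
          PySem.List.pyRange_one_succ_right (by omega : (1:ℤ) ≤ M-1),
          List.foldl_append, List.foldl_cons, List.foldl_nil]
        norm_num
      obtain ⟨ihlen, ihget⟩ := ih (M-1) (by omega) (by omega) (by omega)
      rw [hsplit, Astep, rangeNeg N ((M-1)-1)]
      obtain ⟨alen, aget⟩ := Ainner (N - ((M-1)-1)).toNat (M-1) N (Aloop N (M-1))
        (by omega) (by omega) (by rw [ihlen]; omega)
      refine ⟨by rw [alen, ihlen], ?_⟩
      intro j hj0 hj1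
      rw [aget j hj0]
      have hMM : (M-1-1).toNat = (M-1).toNat - 1 := by omega
      have hDj : Drec (M-1).toNat j.toNat = Drec ((M-1).toNat - 1) j.toNat
          + (if (M-1).toNat ≤ j.toNat then Drec ((M-1).toNat - 1) (j.toNat - (M-1).toNat) else 0) := by
        rw [show (M-1).toNat = ((M-1).toNat - 1)+1 from by omega]
        rfl
      by_cases hcond : N - ((N - (M - 1 - 1)).toNat : ℤ) < j ∧ j ≤ N
      · rw [if_pos hcond, ihget j hj0 hj1, ihget (j - (M-1)) (by omega) (by omega)]
        rw [hDj, if_pos (by omega)]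
        have : (j - (M-1)).toNat = j.toNat - (M-1).toNat := by omega
        rw [this, hMM]
      · rw [if_neg hcond, ihget j hj0 hj1, hDj, if_neg (by omega), add_zero, hMM]

lemma Aport (N : ℤ) : compute_strict N =
    (if (PySem.List.enumerate knownA).all (fun iv => !(decide (iv.1 ≤ N))
        || (PySem.List.pyGetD (Aloop N (N+1)) iv.1 0 == iv.2))
      then Aloop N (N+1) else []) := rfl

lemma Acheck_one (N : ℤ) (hN : 0 ≤ N) (i v : ℤ) (hi : 0 ≤ i) (hv : Drec i.toNat i.toNat = v) :
    (!(decide (i ≤ N)) || (PySem.List.pyGetD (Aloop N (N+1)) i 0 == v)) = true := by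
  by_cases hle : i ≤ N
  · obtain ⟨hlen, hget⟩ := Aouter N hN (N+1) (by omega) (by omega)
    rw [show ((N:ℤ)+1-1) = N from by ring] at hget
    simp only [Bool.or_eq_true, beq_iff_eq]
    right
    rw [hget i hi hle, Dstab N.toNat i.toNat (by omega), hv]
  · simp [hle]

lemma Acheck (N : ℤ) (hN : 0 ≤ N) : ((PySem.List.enumerate knownA).all (fun iv => !(decide (iv.1 ≤ N))
    || (PySem.List.pyGetD (Aloop N (N+1)) iv.1 0 == iv.2))) = true := by
  rw [List.all_eq_true]
  intro iv hmem
  fin_cases hmem <;> exact Acheck_one N hN _ _ (by norm_num) (by decide)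

lemma Afinal (N : ℤ) (hN : 0 ≤ N) : compute_strict N = Aloop N (N+1) := by
  rw [Aport, Acheck N hN]
  rfl

-- B's inner loop state
def Bfold (N k b : ℤ) (row t0 : List ℤ) : List ℤ × List ℤ :=
  (PySem.List.pyRange k b 1).foldl (fun (p : List Int × List Int) n =>
    let nw := PySem.List.pySetD p.1 n
      (PySem.List.pyGetD p.1 (n - k) 0 + PySem.List.pyGetD row (n - k) 0)
    (nw, PySem.List.pySetD p.2 n (PySem.List.pyGetD p.2 n 0 + PySem.List.pyGetD nw n 0)))
    (List.replicate (N+1).toNat 0, t0)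

lemma altLoop_eq (N k : ℤ) (row t : List ℤ) : altLoop N k row t =
    if PySem.Int.floordiv (k * (k + 1)) 2 ≤ N
      then altLoop N (k+1) (Bfold N k (N+1) row t).1 (Bfold N k (N+1) row t).2
      else t := by
  rw [altLoop]
  rfl

lemma Trec_step (c : ℕ) (k : ℤ) (hk : 1 ≤ k) :
    Trec ((k + c).toNat) k.toNat = Trec c k.toNat + Trec c (k.toNat - 1) := by
  obtain ⟨k', hk'⟩ : ∃ k', k.toNat = k' + 1 := ⟨k.toNat - 1, by omega⟩
  rw [hk', Trec, if_neg (by omega)]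
  have h1 : (k + c).toNat - (k'+1) = c := by omega
  rw [h1]
  norm_num

lemma Binner (N : ℤ) (row : List ℤ) (k : ℤ) (hk : 1 ≤ k)
    (hrow : ∀ j : ℤ, 0 ≤ j → j ≤ N → PySem.List.pyGetD row j 0 = Trec j.toNat (k.toNat - 1)) :
    ∀ (c : ℕ), k + c ≤ N + 1 → ∀ (t0 : List ℤ), t0.length = (N+1).toNat →
    (Bfold N k (k+c) row t0).1.length = (N+1).toNat ∧
    (Bfold N k (k+c) row t0).2.length = (N+1).toNat ∧
    (∀ j : ℤ, 0 ≤ j → j ≤ N → PySem.List.pyGetD (Bfold N k (k+c) row t0).1 j 0 =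
      if j < k + c then Trec j.toNat k.toNat else 0) ∧
    (∀ j : ℤ, 0 ≤ j → j ≤ N → PySem.List.pyGetD (Bfold N k (k+c) row t0).2 j 0 =
      PySem.List.pyGetD t0 j 0 + (if k ≤ j ∧ j < k + c then Trec j.toNat k.toNat else 0)) := by
  intro c
  induction c with
  | zero =>
    intro hc t0 ht0
    rw [show k + ((0:ℕ):ℤ) = k from by norm_num]
    rw [Bfold, show PySem.List.pyRange k k 1 = [] from by rw [PySem.List.pyRange_one]; simp,
      List.foldl_nil]
    refine ⟨by rw [List.length_replicate], ht0, ?_, ?_⟩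
    · intro j h0 h1
      by_cases hj : j < k
      · rw [if_pos hj, PySem.List.pyGetD_of_nonneg _ _ h0]
        rw [Tlt j.toNat k.toNat (by omega)]
        exact List.getD_replicate 0 (by omega)
      · rw [if_neg hj, PySem.List.pyGetD_of_nonneg _ _ h0]
        exact List.getD_replicate 0 (by omega)
    · intro j h0 h1
      rw [if_neg (by omega), add_zero]
  | succ c ih =>
    intro hc t0 ht0
    obtain ⟨l1, l2, g1, g2⟩ := ih (by omega) t0 ht0
    have hsplit : Bfold N k (k+(c+1:ℕ)) row t0 =
        (fun (p : List Int × List Int) n =>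
          let nw := PySem.List.pySetD p.1 n
            (PySem.List.pyGetD p.1 (n - k) 0 + PySem.List.pyGetD row (n - k) 0)
          (nw, PySem.List.pySetD p.2 n (PySem.List.pyGetD p.2 n 0 + PySem.List.pyGetD nw n 0)))
          (Bfold N k (k+c) row t0) (k+c) := by
      rw [Bfold, Bfold, show k + ((c+1:ℕ):ℤ) = (k + c) + 1 from by push_cast; ring,
        PySem.List.pyRange_one_succ_right (by omega : k ≤ k + (c:ℤ)), List.foldl_append,
        List.foldl_cons, List.foldl_nil]
    rw [hsplit]
    simp only []
    -- the value written into new at index k+c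
    have hread1 : PySem.List.pyGetD (Bfold N k (k+c) row t0).1 ((k+c) - k) 0 = Trec c k.toNat := by
      rw [show (k + (c:ℤ)) - k = (c:ℤ) from by ring, g1 c (by omega) (by omega),
        if_pos (by omega), Int.toNat_natCast]
    have hread2 : PySem.List.pyGetD row ((k+c) - k) 0 = Trec c (k.toNat - 1) := by
      rw [show (k + (c:ℤ)) - k = (c:ℤ) from by ring, hrow c (by omega) (by omega),
        Int.toNat_natCast]
    have hval : PySem.List.pyGetD (Bfold N k (k+c) row t0).1 ((k+c) - k) 0
        + PySem.List.pyGetD row ((k+c) - k) 0 = Trec ((k+c).toNat) k.toNat := by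
      rw [hread1, hread2, Trec_step c k hk]
    have hn0 : (0:ℤ) ≤ k + c := by omega
    have hn1 : k + (c:ℤ) < ((Bfold N k (k+c) row t0).1.length : ℤ) := by rw [l1]; omega
    have hn2 : k + (c:ℤ) < ((Bfold N k (k+c) row t0).2.length : ℤ) := by rw [l2]; omega
    refine ⟨by rw [PySem.List.length_pySetD, l1], by rw [PySem.List.length_pySetD, l2], ?_, ?_⟩
    · intro j h0 h1
      rw [getD_setD_int _ _ _ _ hn0 hn1 h0]
      by_cases hj : j = k + c
      · rw [if_pos hj, hval, if_pos (by omega), hj]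
      · rw [if_neg hj, g1 j h0 h1]
        by_cases hlt : j < k + c
        · rw [if_pos hlt, if_pos (by push_cast; omega)]
        · rw [if_neg hlt, if_neg (by push_cast; omega)]
    · intro j h0 h1
      rw [getD_setD_int _ _ _ _ hn0 hn2 h0]
      by_cases hj : j = k + c
      · rw [if_pos hj, getD_setD_int _ _ _ _ hn0 hn1 hn0, if_pos rfl, hval,
          g2 (k+c) hn0 (by omega), if_neg (by omega), add_zero, hj,
          if_pos (by push_cast; omega)]
      · rw [if_neg hj, g2 j h0 h1]
        by_cases hcond : k ≤ j ∧ j < k + c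
        · rw [if_pos hcond, if_pos (by push_cast; omega)]
        · rw [if_neg hcond, if_neg (by push_cast; omega)]

lemma guard_iff (N k : ℤ) (hk : 1 ≤ k) :
    PySem.Int.floordiv (k * (k + 1)) 2 ≤ N ↔ ((tri k.toNat : ℕ) : ℤ) ≤ N := by
  rw [PySem.Int.floordiv_eq_ediv_of_pos (by norm_num), tri]
  rw [Int.natCast_ediv]
  have h3 : ((k.toNat : ℕ) : ℤ) = k := by omega
  push_cast
  rw [h3]

lemma Baltloop (N : ℤ) (hN : 0 ≤ N) : ∀ (d : ℕ) (k : ℤ) (row t : List ℤ), 1 ≤ k →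
    (N + 1 - k).toNat ≤ d →
    row.length = (N+1).toNat → t.length = (N+1).toNat →
    (∀ j : ℤ, 0 ≤ j → j ≤ N → PySem.List.pyGetD row j 0 = Trec j.toNat (k.toNat - 1)) →
    (∀ j : ℤ, 0 ≤ j → j ≤ N → PySem.List.pyGetD t j 0 = ∑ i ∈ Finset.range k.toNat, Trec j.toNat i) →
    (altLoop N k row t).length = (N+1).toNat ∧
    ∀ j : ℤ, 0 ≤ j → j ≤ N → PySem.List.pyGetD (altLoop N k row t) j 0 = AnsB j.toNat := by
  intro d
  induction d with
  | zero =>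
    intro k row t hk hd hrl htl hrow ht
    have hg : ¬ PySem.Int.floordiv (k * (k + 1)) 2 ≤ N := by
      rw [guard_iff N k hk]
      have := tri_ge k.toNat
      omega
    rw [altLoop_eq, if_neg hg]
    refine ⟨htl, ?_⟩
    intro j h0 h1
    rw [ht j h0 h1]
    exact sumT j.toNat k.toNat (fun i hi => Ttri j.toNat i (by have h2 := tri_ge i; omega))
  | succ d ih =>
    intro k row t hk hd hrl htl hrow ht
    by_cases hg : PySem.Int.floordiv (k * (k + 1)) 2 ≤ N
    · rw [altLoop_eq, if_pos hg]
      have hkN : ((tri k.toNat : ℕ) : ℤ) ≤ N := (guard_iff N k hk).1 hg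
      have hkle : k ≤ N := by have := tri_ge k.toNat; omega
      have hb : (N+1 : ℤ) = k + (((N+1-k).toNat : ℕ) : ℤ) := by omega
      obtain ⟨l1, l2, g1, g2⟩ := Binner N row k hk hrow (N+1-k).toNat (by omega) t htl
      rw [← hb] at l1 l2 g1 g2
      refine ih (k+1) _ _ (by omega) (by omega) l1 l2 ?_ ?_
      · intro j h0 h1
        rw [g1 j h0 h1, if_pos (by omega), show (k+1).toNat - 1 = k.toNat from by omega]
      · intro j h0 h1
        rw [g2 j h0 h1, ht j h0 h1, show (k+1).toNat = k.toNat + 1 from by omega,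
          Finset.sum_range_succ]
        by_cases hj : k ≤ j
        · rw [if_pos (by omega)]
        · rw [if_neg (by omega), Tlt j.toNat k.toNat (by omega), add_zero]
    · rw [altLoop_eq, if_neg hg]
      rw [guard_iff N k hk] at hg
      refine ⟨htl, ?_⟩
      intro j h0 h1
      rw [ht j h0 h1]
      refine sumT j.toNat k.toNat (fun i hi => Ttri j.toNat i ?_)
      have h2 := tri_mono hi
      omega

lemma Bport (N : ℤ) : compute_strict_alt N
    = altLoop N 1 (1 :: List.replicate N.toNat 0) (1 :: List.replicate N.toNat 0) := rfl

lemma init_get (N : ℤ) (j : ℤ) (h0 : 0 ≤ j) :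
    PySem.List.pyGetD (1 :: List.replicate N.toNat (0:ℤ)) j 0 = if j = 0 then 1 else 0 := by
  rw [PySem.List.pyGetD_of_nonneg _ _ h0]
  by_cases hj : j = 0
  · rw [if_pos hj, show j.toNat = 0 from by omega]
    rfl
  · rw [if_neg hj, show j.toNat = (j.toNat - 1) + 1 from by omega]
    show (List.replicate N.toNat (0:ℤ)).getD (j.toNat - 1) 0 = 0
    rcases Nat.lt_or_ge (j.toNat - 1) N.toNat with h | h
    · exact List.getD_replicate 0 h
    · rw [List.getD_eq_default]
      rw [List.length_replicate]
      omega

lemma Bfinal (N : ℤ) (hN : 0 ≤ N) : (compute_strict_alt N).length = (N+1).toNat ∧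
    ∀ j : ℤ, 0 ≤ j → j ≤ N → PySem.List.pyGetD (compute_strict_alt N) j 0 = AnsB j.toNat := by
  rw [Bport]
  have hlen : (1 :: List.replicate N.toNat (0:ℤ)).length = (N+1).toNat := by
    simp only [List.length_cons, List.length_replicate]
    omega
  refine Baltloop N hN N.toNat 1 _ _ (by omega) (by omega) hlen hlen ?_ ?_
  · intro j h0 h1
    rw [init_get N j h0, show (1:ℤ).toNat - 1 = 0 from rfl]
    by_cases hj : j = 0
    · rw [if_pos hj, show j.toNat = 0 from by omega, Trec]
      rw [if_pos rfl]
    · rw [if_neg hj, show Trec j.toNat 0 = if j.toNat = 0 then 1 else 0 from by rw [Trec],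
        if_neg (by omega)]
  · intro j h0 h1
    rw [init_get N j h0, show (1:ℤ).toNat = 1 from rfl, Finset.sum_range_one]
    by_cases hj : j = 0
    · rw [if_pos hj, show j.toNat = 0 from by omega, Trec, if_pos rfl]
    · rw [if_neg hj, show Trec j.toNat 0 = if j.toNat = 0 then 1 else 0 from by rw [Trec],
        if_neg (by omega)]

-- ===== VERDICT (by name: the statement is the Claim_ definition above) =====
theorem compute_strict_spec : Claim_equal_compute_strict := by
  intro N _ hpre
  have hN : (0:ℤ) ≤ N := hpre
  show compute_strict N = compute_strict_alt N
  obtain ⟨halen, haget⟩ := Aouter N hN (N+1) (by omega) (by omega)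
  rw [show ((N:ℤ)+1-1) = N from by ring] at haget
  obtain ⟨hblen, hbget⟩ := Bfinal N hN
  rw [Afinal N hN]
  apply List.ext_getElem (by rw [halen, hblen])
  intro i h1 h2
  have hi : ((i:ℕ):ℤ) ≤ N := by
    rw [halen] at h1
    omega
  have hA := haget (i:ℤ) (Int.natCast_nonneg _) hi
  have hB := hbget (i:ℤ) (Int.natCast_nonneg _) hi
  rw [PySem.List.pyGetD_eq_getElem _ _ (Int.natCast_nonneg _) (by rw [halen]; omega)] at hA
  rw [PySem.List.pyGetD_eq_getElem _ _ (Int.natCast_nonneg _) (by rw [hblen]; omega)] at hB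
  simp only [Int.toNat_natCast] at hA hB
  rw [hA, hB, Dstab N.toNat i (by omega), main_identity]
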